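-- pv_equiv track=rewrite | github.com/sergeisidorkin/ai_app | classifiers_app/migrations/0043_backfill_reorganization_events.py | _unique_event_uid
-- ===== SOURCE A (Python) =====
-- def _unique_event_uid(candidate, relation_pk, seen):
--     value = (candidate or "").strip()
--     if not value:
--         value = f"{relation_pk:05d}-REO"
--     if value not in seen:
--         seen.add(value)
--         return value
--
--     fallback = f"{relation_pk:05d}-REO"
--     if fallback not in seen:
--         seen.add(fallback)
--         return fallback
--
--     suffix = relation_pk + 1
--     while True:
--         fallback = f"{suffix:05d}-REO"
--         if fallback not in seen:
--             seen.add(fallback)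
--             return fallback
--         suffix += 1
-- ===== SOURCE B (Python) =====
-- def _unique_event_uid(candidate, relation_pk, seen):
--     # Build a finite candidate window that is guaranteed (pigeonhole: it holds
--     # len(seen) + 1 distinct formatted suffixes) to contain a free uid, filter
--     # out everything already seen, and take the first survivor.
--     value = (candidate or "").strip()
--     default = f"{relation_pk:05d}-REO"
--     window = [f"{s:05d}-REO" for s in range(relation_pk + 1, relation_pk + 2 + len(seen))]
--     free = [c for c in [value or default, default] + window if c not in seen]
--     uid = free[0]
--     seen.add(uid)
--     return uid
-- ===== Notes on version B (the rewrite author's own statement) =====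
-- stated objective: alternative
-- what changed: A probes candidates one by one with three staged guarded returns and an unbounded while-loop; B instead materialises a finite candidate window of len(seen)+3 strings (sufficient by pigeonhole, since the window holds len(seen)+1 distinct formatted suffixes), filters out the seen ones in one pass, and returns the first survivor - no early returns and no unbounded search.
import Mathlib
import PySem

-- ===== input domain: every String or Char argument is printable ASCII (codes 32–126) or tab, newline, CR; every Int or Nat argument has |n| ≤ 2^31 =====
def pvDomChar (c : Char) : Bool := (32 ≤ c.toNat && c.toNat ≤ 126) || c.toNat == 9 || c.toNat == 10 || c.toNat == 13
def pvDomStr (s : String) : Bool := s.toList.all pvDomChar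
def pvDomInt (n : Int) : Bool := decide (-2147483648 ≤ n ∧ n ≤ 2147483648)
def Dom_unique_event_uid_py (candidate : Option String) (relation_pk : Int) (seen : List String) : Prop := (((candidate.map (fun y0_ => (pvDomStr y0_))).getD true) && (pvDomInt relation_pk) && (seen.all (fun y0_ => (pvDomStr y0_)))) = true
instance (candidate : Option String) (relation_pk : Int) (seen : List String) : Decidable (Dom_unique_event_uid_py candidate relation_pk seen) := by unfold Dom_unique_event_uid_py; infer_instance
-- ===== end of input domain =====

-- B replaces A's staged guarded returns and unbounded probe loop by a finite candidate
-- window (big enough by pigeonhole) filtered against `seen` in one pass (objective: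
-- alternative algorithm, same cost). Both Pythons add the returned uid to the caller's
-- `seen` set; the equivalence proved here is about the RETURN value (seen : PySem.Set String).

-- ===== PORT A =====
-- f"{n:05d}-REO"  (str(n).zfill(5) is exactly Python's f"{n:05d}")
def pvFmtREO (n : Int) : String := PySem.Str.zfill (PySem.Int.toStr n) 5 ++ "-REO"

-- A's `while True` loop from `suffix` upward. Fuel seen.length + 1 is enough in Python
-- reality (that many distinct formatted candidates cannot all lie in the set `seen`);
-- at fuel 0 the current candidate is returned unguarded (dead branch).
def pvLoopA (seen : List String) : Nat → Int → String
  | 0, suffix => pvFmtREO suffix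
  | fuel+1, suffix =>
    let fb := pvFmtREO suffix
    if PySem.Set.contains seen fb then pvLoopA seen fuel (suffix + 1) else fb

def unique_event_uid_py (candidate : Option String) (relation_pk : Int) (seen : List String) : String :=
  let value0 := PySem.Str.strip (candidate.getD "")
  let value := if value0 = "" then pvFmtREO relation_pk else value0
  if ¬ PySem.Set.contains seen value then value
  else
    let fallback := pvFmtREO relation_pk
    if ¬ PySem.Set.contains seen fallback then fallback
    else pvLoopA seen (seen.length + 1) (relation_pk + 1)

-- ===== PORT B =====
def unique_event_uid_py_alt (candidate : Option String) (relation_pk : Int) (seen : List String) : String :=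
  let value := PySem.Str.strip (candidate.getD "")
  let dflt := pvFmtREO relation_pk
  let window := (PySem.List.pyRange (relation_pk + 1) (relation_pk + 2 + seen.length) 1).map pvFmtREO
  let free := ((if value = "" then dflt else value) :: dflt :: window).filter
      (fun c => ! PySem.Set.contains seen c)
  -- free[0]; in Python `free` is never empty (the window holds len(seen)+1 distinct
  -- formatted suffixes), so the default of this lookup is a dead branch
  free.headD (pvFmtREO (relation_pk + 2 + seen.length))

-- ===== PRECONDITION & SPEC =====
def Spec_unique_event_uid_py (candidate : Option String) (relation_pk : Int) (seen : List String) (out : String) : Prop := out = unique_event_uid_py_alt candidate relation_pk seen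
instance (candidate : Option String) (relation_pk : Int) (seen : List String) (out : String) : Decidable (Spec_unique_event_uid_py candidate relation_pk seen out) := by unfold Spec_unique_event_uid_py; infer_instance

-- ===== CLAIM (what is proved, stated in full; the proofs are below) =====
def Claim_equal_unique_event_uid_py : Prop := ∀ (candidate : Option String) (relation_pk : Int) (seen : List String), Dom_unique_event_uid_py candidate relation_pk seen → Spec_unique_event_uid_py candidate relation_pk seen (unique_event_uid_py candidate relation_pk seen)

-- ===== LEMMAS AND PROOFS =====
-- A's probe loop with fuel f from a is the first unseen formatted candidate in the
-- window [a, a+f), with a+f as the exhaustion value.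
theorem pvLoopA_eq_headD_filter (seen : List String) (fuel : Nat) (a : Int) :
    pvLoopA seen fuel a =
      (((PySem.List.pyRange a (a + fuel) 1).map pvFmtREO).filter
        (fun c => ! PySem.Set.contains seen c)).headD (pvFmtREO (a + fuel)) := by
  induction fuel generalizing a with
  | zero => simp [pvLoopA, PySem.List.pyRange_one_eq_nil (le_refl a)]
  | succ n ih =>
    rw [PySem.List.pyRange_one_cons (by push_cast; omega), List.map_cons, List.filter_cons]
    rw [show a + ((n + 1 : Nat) : Int) = (a + 1) + (n : Int) by push_cast; omega]
    by_cases h : PySem.Set.contains seen (pvFmtREO a)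
    · simp only [pvLoopA, h, if_pos, Bool.not_true, Bool.false_eq_true, if_false]
      exact ih (a + 1)
    · have h' : pvFmtREO a ∉ seen := by simpa [PySem.Set.contains] using h
      simp [pvLoopA, PySem.Set.contains, h']

-- ===== VERDICT (by name: the statement is the Claim_ definition above) =====
theorem unique_event_uid_py_spec : Claim_equal_unique_event_uid_py := by
  intro candidate relation_pk seen _
  unfold Spec_unique_event_uid_py unique_event_uid_py unique_event_uid_py_alt
  rw [show relation_pk + 2 + (seen.length : Int)
        = (relation_pk + 1) + ((seen.length + 1 : Nat) : Int) by push_cast; omega]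
  dsimp only
  by_cases h1 : (if PySem.Str.strip (candidate.getD "") = "" then pvFmtREO relation_pk
      else PySem.Str.strip (candidate.getD "")) ∈ seen <;>
    by_cases h2 : pvFmtREO relation_pk ∈ seen <;>
      simp [PySem.Set.contains, h1, h2,
        pvLoopA_eq_headD_filter seen (seen.length + 1) (relation_pk + 1)]
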